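-- pv_equiv track=rewrite | github.com/Micahaha/CCSCE_Eastern-CHC-Programming-Repository | 2024_questions/combo_deal.py | calculate_WCK_total
-- ===== SOURCE A (Python) =====
-- WCK = [2, 7, 9, 3, 3, 3] # small burger, large burger, specialty burger, fries, drink, dessert
--
-- WCK_COMBO_1 = 9 # large + fries + drink
--
-- def calculate_WCK_total(customer_order):
--     wck_total = 0
--     temp_order = customer_order.copy()
--
--     ## combo 1: large + fries + drink
--
--     ## just grab smallest value of the three
--
--     # grabs smallest value because that is the max number of combos possible
--
--     combo_1 = min(temp_order[1], temp_order[3], temp_order[4]) # large + fries + drink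
--
--     wck_total += combo_1 * WCK_COMBO_1
--
--     ## subtract combo items from temp order
--     temp_order[1] -= combo_1
--     temp_order[3] -= combo_1
--     temp_order[4] -= combo_1
--
--     for i in range(len(temp_order)):
--         quantity = temp_order[i]
--         price = WCK[i]
--         wck_total += quantity * price
--     return wck_total
-- ===== SOURCE B (Python) =====
-- WCK = [2, 7, 9, 3, 3, 3]
--
-- def calculate_WCK_total(customer_order):
--     # gross total at individual prices; each combo (large+fries+drink) saves 13-9 = 4
--     gross = sum(q * p for q, p in zip(customer_order, WCK))
--     combo_1 = min(customer_order[1], customer_order[3], customer_order[4])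
--     return gross - 4 * combo_1
-- ===== Notes on version B (the rewrite author's own statement) =====
-- stated objective: simpler
-- what changed: B drops the list copy, the per-index mutation and the final index loop: it sums order[i]*WCK[i] once via zip and subtracts the fixed per-combo saving 4 = (7+3+3)-9 times the combo count.
import Mathlib
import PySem

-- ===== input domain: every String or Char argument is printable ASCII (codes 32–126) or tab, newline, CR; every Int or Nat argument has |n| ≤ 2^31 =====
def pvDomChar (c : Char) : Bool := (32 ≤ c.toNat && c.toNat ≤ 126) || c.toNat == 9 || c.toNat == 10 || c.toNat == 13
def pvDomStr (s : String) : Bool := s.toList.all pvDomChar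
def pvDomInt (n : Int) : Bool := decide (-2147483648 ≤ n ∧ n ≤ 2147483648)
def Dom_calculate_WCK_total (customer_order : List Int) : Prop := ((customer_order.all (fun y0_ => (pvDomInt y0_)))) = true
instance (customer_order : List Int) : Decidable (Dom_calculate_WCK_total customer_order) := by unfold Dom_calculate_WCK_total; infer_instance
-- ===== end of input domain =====

-- B replaces A's copy / triple mutation / final index loop by one zip-sum and the fixed
-- per-combo saving 4 = (7+3+3)-9; objective: simpler.

-- ===== PORT A =====
def WCK : List Int := [2, 7, 9, 3, 3, 3]

def WCK_COMBO_1 : Int := 9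

-- pyGet?/getD 0 is exact on Pre_ (indices 1,3,4 and WCK[i] exist there; Python raises outside Pre_)
def calculate_WCK_total (customer_order : List Int) : Int :=
  let temp_order := customer_order
  let combo_1 := min (min ((PySem.List.pyGet? temp_order 1).getD 0)
                          ((PySem.List.pyGet? temp_order 3).getD 0))
                     ((PySem.List.pyGet? temp_order 4).getD 0)
  let wck_total : Int := 0 + combo_1 * WCK_COMBO_1
  let temp_order := temp_order.set 1 (((PySem.List.pyGet? temp_order 1).getD 0) - combo_1)
  let temp_order := temp_order.set 3 (((PySem.List.pyGet? temp_order 3).getD 0) - combo_1)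
  let temp_order := temp_order.set 4 (((PySem.List.pyGet? temp_order 4).getD 0) - combo_1)
  (List.range temp_order.length).foldl
    (fun s i => s + ((PySem.List.pyGet? temp_order (i : Int)).getD 0)
                    * ((PySem.List.pyGet? WCK (i : Int)).getD 0)) wck_total

-- ===== PORT B =====
def calculate_WCK_total_alt (customer_order : List Int) : Int :=
  let gross := (customer_order.zip WCK).foldl (fun s qp => s + qp.1 * qp.2) 0
  let combo_1 := min (min ((PySem.List.pyGet? customer_order 1).getD 0)
                          ((PySem.List.pyGet? customer_order 3).getD 0))
                     ((PySem.List.pyGet? customer_order 4).getD 0)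
  gross - 4 * combo_1

-- ===== PRECONDITION & SPEC =====
-- A indexes customer_order at 1,3,4 (so needs length ≥ 5) and indexes WCK (6 entries) at
-- every i < length (so needs length ≤ 6): outside this A raises IndexError.
def Pre_calculate_WCK_total (customer_order : List Int) : Prop :=
  customer_order.length = 5 ∨ customer_order.length = 6
instance (customer_order : List Int) : Decidable (Pre_calculate_WCK_total customer_order) := by
  unfold Pre_calculate_WCK_total; infer_instance

def pvWitness_calculate_WCK_total : List Int := [1, 2, 0, 3, 4]

def Spec_calculate_WCK_total (customer_order : List Int) (out : Int) : Prop :=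
  out = calculate_WCK_total_alt customer_order
instance (customer_order : List Int) (out : Int) : Decidable (Spec_calculate_WCK_total customer_order out) := by
  unfold Spec_calculate_WCK_total; infer_instance

-- ===== CLAIM (what is proved, stated in full; the proofs are below) =====
def Claim_equal_calculate_WCK_total : Prop :=
  ∀ (customer_order : List Int), Dom_calculate_WCK_total customer_order →
    Pre_calculate_WCK_total customer_order →
    Spec_calculate_WCK_total customer_order (calculate_WCK_total customer_order)

-- ===== LEMMAS AND PROOFS =====

-- ===== VERDICT (by name: the statement is the Claim_ definition above) =====
theorem calculate_WCK_total_spec : Claim_equal_calculate_WCK_total := by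
  intro co _ hpre
  unfold Pre_calculate_WCK_total at hpre
  rcases co with _ | ⟨a, _ | ⟨b, _ | ⟨c, _ | ⟨d, _ | ⟨e, rest⟩⟩⟩⟩⟩ <;>
    simp at hpre
  rcases rest with _ | ⟨f, _ | ⟨g, rest⟩⟩ <;> simp at hpre <;>
  · unfold Spec_calculate_WCK_total calculate_WCK_total calculate_WCK_total_alt WCK WCK_COMBO_1
    simp [PySem.List.pyGet?, PySem.List.pyIdx?, List.range_succ, List.zip]
    generalize min (min b d) e = m
    ring
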